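-- pv_equiv track=rewrite | github.com/shaitamam-80/-Find-My-Journal- | backend/scripts/run_benchmark.py | find_journal_position
-- ===== SOURCE A (Python) =====
-- from typing import List, Tuple
--
-- def normalize_journal_name(name: str) -> str:
--     """Normalize journal name for comparison."""
--     # Lowercase
--     name = name.lower()
--     # Remove common prefixes/suffixes
--     prefixes = ["the ", "a "]
--     for prefix in prefixes:
--         if name.startswith(prefix):
--             name = name[len(prefix):]
--     # Remove punctuation and extra spaces
--     name = "".join(c if c.isalnum() or c.isspace() else " " for c in name)
--     name = " ".join(name.split())
--     return name
--
-- def fuzzy_match(target: str, candidate: str) -> bool: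
--     """
--     Check if candidate journal name matches target using fuzzy logic.
--
--     Handles cases like:
--     - "Nature Biotechnology" vs "Nature Biotechnology Journal"
--     - "IEEE TPAMI" vs "IEEE Transactions on Pattern Analysis..."
--     - Partial matches for long journal names
--     """
--     target_norm = normalize_journal_name(target)
--     candidate_norm = normalize_journal_name(candidate)
--
--     # Exact match after normalization
--     if target_norm == candidate_norm:
--         return True
--
--     # One contains the other
--     if target_norm in candidate_norm or candidate_norm in target_norm:
--         return True
--
--     # Check for significant word overlap (at least 60% of target words)
--     target_words = set(target_norm.split())
--     candidate_words = set(candidate_norm.split())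
--
--     if len(target_words) == 0:
--         return False
--
--     overlap = len(target_words & candidate_words)
--     overlap_ratio = overlap / len(target_words)
--
--     if overlap_ratio >= 0.6 and overlap >= 2:
--         return True
--
--     # Special handling for abbreviations
--     # "NEJM" -> "New England Journal of Medicine"
--     # "JACS" -> "Journal of the American Chemical Society"
--     abbreviation_map = {
--         "nejm": "new england journal medicine",
--         "jacs": "journal american chemical society",
--         "pnas": "proceedings national academy sciences",
--         "bmj": "british medical journal",
--         "prl": "physical review letters",
--     }
--
--     for abbrev, full in abbreviation_map.items():
--         if abbrev in target_norm or abbrev in candidate_norm: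
--             if full in target_norm or full in candidate_norm:
--                 return True
--
--     return False
--
-- def find_journal_position(target: str, journals: List[str]) -> Tuple[int, str, str]:
--     """
--     Find the position of target journal in results list.
--
--     Returns:
--         (position, match_type, matched_name)
--         position: 0-indexed position, or -1 if not found
--         match_type: "exact", "fuzzy", or "miss"
--         matched_name: the actual journal name that matched
--     """
--     target_norm = normalize_journal_name(target)
--
--     # First pass: exact matches
--     for i, journal in enumerate(journals):
--         if normalize_journal_name(journal) == target_norm:
--             return i, "exact", journal
--
--     # Second pass: fuzzy matches
--     for i, journal in enumerate(journals):
--         if fuzzy_match(target, journal):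
--             return i, "fuzzy", journal
--
--     return -1, "miss", ""
-- ===== SOURCE B (Python) =====
-- from typing import List, Tuple
--
-- def normalize_journal_name(name: str) -> str:
--     name = name.lower()
--     prefixes = ["the ", "a "]
--     for prefix in prefixes:
--         if name.startswith(prefix):
--             name = name[len(prefix):]
--     name = "".join(c if c.isalnum() or c.isspace() else " " for c in name)
--     name = " ".join(name.split())
--     return name
--
-- def fuzzy_match(target: str, candidate: str) -> bool:
--     target_norm = normalize_journal_name(target)
--     candidate_norm = normalize_journal_name(candidate)
--     if target_norm == candidate_norm:
--         return True
--     if target_norm in candidate_norm or candidate_norm in target_norm: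
--         return True
--     target_words = set(target_norm.split())
--     candidate_words = set(candidate_norm.split())
--     if len(target_words) == 0:
--         return False
--     overlap = len(target_words & candidate_words)
--     overlap_ratio = overlap / len(target_words)
--     if overlap_ratio >= 0.6 and overlap >= 2:
--         return True
--     abbreviation_map = {
--         "nejm": "new england journal medicine",
--         "jacs": "journal american chemical society",
--         "pnas": "proceedings national academy sciences",
--         "bmj": "british medical journal",
--         "prl": "physical review letters",
--     }
--     for abbrev, full in abbreviation_map.items():
--         if abbrev in target_norm or abbrev in candidate_norm:
--             if full in target_norm or full in candidate_norm:
--                 return True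
--     return False
--
-- def find_journal_position(target: str, journals: List[str]) -> Tuple[int, str, str]:
--     """Single pass: return at once on the first exact match (exact has global
--     priority), otherwise remember the earliest fuzzy match and fall back to it."""
--     target_norm = normalize_journal_name(target)
--     fuzzy_hit = None
--     for i, journal in enumerate(journals):
--         if normalize_journal_name(journal) == target_norm:
--             return i, "exact", journal
--         if fuzzy_hit is None and fuzzy_match(target, journal):
--             fuzzy_hit = (i, "fuzzy", journal)
--     return fuzzy_hit if fuzzy_hit is not None else (-1, "miss", "")
-- ===== Notes on version B (the rewrite author's own statement) =====
-- stated objective: alternative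
-- what changed: Replaced A's two full passes (exact scan, then fuzzy scan) by one loop over enumerate(journals) that returns immediately on the first exact match and otherwise records only the earliest fuzzy match, falling back to it after the loop; target_norm is computed once.
import Mathlib
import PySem

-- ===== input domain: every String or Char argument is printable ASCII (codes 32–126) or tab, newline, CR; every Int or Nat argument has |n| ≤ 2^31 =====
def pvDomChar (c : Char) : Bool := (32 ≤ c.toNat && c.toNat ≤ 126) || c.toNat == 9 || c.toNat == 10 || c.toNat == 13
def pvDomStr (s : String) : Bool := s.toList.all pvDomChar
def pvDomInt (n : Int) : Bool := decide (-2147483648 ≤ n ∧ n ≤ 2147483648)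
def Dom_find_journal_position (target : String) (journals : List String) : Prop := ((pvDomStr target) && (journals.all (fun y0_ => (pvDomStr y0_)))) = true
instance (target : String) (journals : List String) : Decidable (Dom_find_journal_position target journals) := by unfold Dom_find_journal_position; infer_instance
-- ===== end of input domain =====

-- B replaces A's two full passes (exact, then fuzzy) with one loop keeping the
-- earliest fuzzy candidate and returning at once on the first exact match (alternative).

-- ===== PORT A =====
-- shared module helpers (used verbatim by both Python versions)
def normalize_journal_name (name : String) : String :=
  let name := PySem.Str.lower name
  let name := ["the ", "a "].foldl
    (fun n p => if PySem.Str.startswith n p then PySem.Str.slice n (some (PySem.Str.len p)) none else n) name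
  let name := String.ofList (name.toList.map (fun c => if PySem.Chars.isalnum c || PySem.Chars.isspace c then c else ' '))
  PySem.Str.join " " (PySem.Str.split₀ name)

-- Python's 'overlap / len(target_words) >= 0.6' (float) is ported as
-- 10*overlap ≥ 6*len: exact here since equality/ordering of p/q vs 0.6 in binary64
-- only flips for denominators beyond 2.5e15, far above any word count on Dom.
def fuzzy_match (target : String) (candidate : String) : Bool :=
  let target_norm := normalize_journal_name target
  let candidate_norm := normalize_journal_name candidate
  if target_norm == candidate_norm then true
  else if PySem.Str.isIn target_norm candidate_norm || PySem.Str.isIn candidate_norm target_norm then true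
  else
    let target_words : PySem.Set String := PySem.Set.ofList (PySem.Str.split₀ target_norm)
    let candidate_words : PySem.Set String := PySem.Set.ofList (PySem.Str.split₀ candidate_norm)
    if PySem.Set.len target_words = 0 then false
    else
      let overlap := PySem.Set.len (PySem.Set.inter target_words candidate_words)
      if 10 * overlap ≥ 6 * PySem.Set.len target_words && overlap ≥ 2 then true
      else
        [("nejm", "new england journal medicine"),
         ("jacs", "journal american chemical society"),
         ("pnas", "proceedings national academy sciences"),
         ("bmj", "british medical journal"),
         ("prl", "physical review letters")].any (fun ab =>
          (PySem.Str.isIn ab.1 target_norm || PySem.Str.isIn ab.1 candidate_norm) &&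
          (PySem.Str.isIn ab.2 target_norm || PySem.Str.isIn ab.2 candidate_norm))

-- A's first pass: 'for i, journal in enumerate(journals): if normalize == target_norm: return …'
def fjpExactPass (target_norm : String) (l : List (Int × String)) : Option (Int × String × String) :=
  match l with
  | [] => none
  | (i, journal) :: rest =>
    if normalize_journal_name journal == target_norm then some (i, "exact", journal)
    else fjpExactPass target_norm rest

-- A's second pass: first fuzzy match
def fjpFuzzyPass (target : String) (l : List (Int × String)) : Option (Int × String × String) :=
  match l with
  | [] => none
  | (i, journal) :: rest =>
    if fuzzy_match target journal then some (i, "fuzzy", journal)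
    else fjpFuzzyPass target rest

def find_journal_position (target : String) (journals : List String) : Int × String × String :=
  let target_norm := normalize_journal_name target
  match fjpExactPass target_norm (PySem.List.enumerate journals) with
  | some r => r
  | none =>
    match fjpFuzzyPass target (PySem.List.enumerate journals) with
    | some r => r
    | none => (-1, "miss", "")

-- ===== PORT B =====
-- single pass: return on first exact hit, else remember the earliest fuzzy hit
def fjpAltLoop (target : String) (target_norm : String) (l : List (Int × String))
    (fuzzy_hit : Option (Int × String × String)) : Int × String × String :=
  match l with
  | [] => fuzzy_hit.getD (-1, "miss", "")
  | (i, journal) :: rest =>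
    if normalize_journal_name journal == target_norm then (i, "exact", journal)
    else fjpAltLoop target target_norm rest
      (if fuzzy_hit.isNone && fuzzy_match target journal then some (i, "fuzzy", journal) else fuzzy_hit)

def find_journal_position_alt (target : String) (journals : List String) : Int × String × String :=
  fjpAltLoop target (normalize_journal_name target) (PySem.List.enumerate journals) none

-- ===== PRECONDITION & SPEC =====
def Spec_find_journal_position (target : String) (journals : List String) (out : Int × String × String) : Prop := out = find_journal_position_alt target journals
instance (target : String) (journals : List String) (out : Int × String × String) : Decidable (Spec_find_journal_position target journals out) := by unfold Spec_find_journal_position; infer_instance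

-- ===== CLAIM (what is proved, stated in full; the proofs are below) =====
def Claim_equal_find_journal_position : Prop := ∀ (target : String) (journals : List String), Dom_find_journal_position target journals → Spec_find_journal_position target journals (find_journal_position target journals)

-- ===== LEMMAS AND PROOFS =====

-- Loop invariant: B's single pass from any tail `l` with recorded fuzzy hit `fz`
-- equals "first exact in l, else fz, else first fuzzy in l, else miss".
theorem fjpAltLoop_eq (target target_norm : String) (l : List (Int × String))
    (fz : Option (Int × String × String)) :
    fjpAltLoop target target_norm l fz =
      match fjpExactPass target_norm l with
      | some r => r
      | none =>
        match fz with
        | some f => f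
        | none => (fjpFuzzyPass target l).getD (-1, "miss", "") := by
  induction l generalizing fz with
  | nil => cases fz <;> simp [fjpAltLoop, fjpExactPass, fjpFuzzyPass]
  | cons p rest ih =>
    obtain ⟨i, journal⟩ := p
    by_cases he : normalize_journal_name journal == target_norm
    · simp [fjpAltLoop, fjpExactPass, he]
    · cases fz with
      | some f =>
        simp [fjpAltLoop, fjpExactPass, he, ih]
      | none =>
        by_cases hf : fuzzy_match target journal
        · simp [fjpAltLoop, fjpExactPass, fjpFuzzyPass, he, hf, ih]
        · simp [fjpAltLoop, fjpExactPass, fjpFuzzyPass, he, hf, ih]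

-- ===== VERDICT (by name: the statement is the Claim_ definition above) =====
theorem find_journal_position_spec : Claim_equal_find_journal_position := by
  intro target journals _
  unfold Spec_find_journal_position find_journal_position find_journal_position_alt
  rw [fjpAltLoop_eq]
  cases hE : fjpExactPass (normalize_journal_name target) (PySem.List.enumerate journals) with
  | some r => simp [hE]
  | none =>
    cases hF : fjpFuzzyPass target (PySem.List.enumerate journals) with
    | some r => simp [hE, hF]
    | none => simp [hE, hF]
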